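-- pv_equiv track=rewrite | github.com/martivit/pin-calculation-app | PiN.py | map_template_to_status
-- ===== SOURCE A (Python) =====
-- def map_template_to_status(template_values, suggestions_mapping, status_values):
--     results = {}
--     for template in template_values:
--         suggestions = suggestions_mapping.get(template, [])
--         # Search for the first matching status with direct comparisons
--         match = next((status for status in status_values if status in suggestions), None)
--         if match:
--             results[template] = match
--         else:
--             results[template] = 'No match found'
--     return results
-- ===== SOURCE B (Python) =====
-- def map_template_to_status(template_values, suggestions_mapping, status_values):
--     # Rank table: each status -> index of its first occurrence in status_values.
--     rank = {}
--     for i, s in enumerate(status_values):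
--         rank.setdefault(s, i)
--     results = {}
--     for template in template_values:
--         # Scan the template's suggestions, keeping the one with the smallest rank.
--         best = None
--         for s in suggestions_mapping.get(template, []):
--             r = rank.get(s)
--             if r is not None and (best is None or r < best[0]):
--                 best = (r, s)
--         match = best[1] if best is not None else None
--         results[template] = match if match else 'No match found'
--     return results
-- ===== Notes on version B (the rewrite author's own statement) =====
-- stated objective: faster
-- what changed: A rescans all of status_values for every template; B builds a first-occurrence rank table over status_values once and, per template, scans only the suggestions for the smallest-rank one, preserving first-in-status_values tie-breaking and the truthiness of empty-string matches.
import Mathlib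
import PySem

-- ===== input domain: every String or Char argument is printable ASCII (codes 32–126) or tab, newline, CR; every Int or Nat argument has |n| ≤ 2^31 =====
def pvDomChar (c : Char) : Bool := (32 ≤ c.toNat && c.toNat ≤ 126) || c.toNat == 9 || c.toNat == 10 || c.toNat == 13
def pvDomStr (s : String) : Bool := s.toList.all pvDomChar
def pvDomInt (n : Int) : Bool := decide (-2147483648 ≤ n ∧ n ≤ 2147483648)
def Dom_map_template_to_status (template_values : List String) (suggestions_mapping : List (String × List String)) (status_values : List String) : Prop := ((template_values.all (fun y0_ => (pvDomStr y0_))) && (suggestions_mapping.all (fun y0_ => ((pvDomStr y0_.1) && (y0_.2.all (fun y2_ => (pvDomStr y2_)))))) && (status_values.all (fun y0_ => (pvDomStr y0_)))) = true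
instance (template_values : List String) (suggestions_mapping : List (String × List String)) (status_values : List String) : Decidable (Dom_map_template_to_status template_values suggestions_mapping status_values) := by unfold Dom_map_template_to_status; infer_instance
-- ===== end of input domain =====

-- B replaces A's per-template rescan of status_values by a first-occurrence rank table over
-- status_values, picking per template the suggestion of smallest rank (objective: faster).

-- ===== PORT A =====
def map_template_to_status (template_values : List String) (suggestions_mapping : List (String × List String)) (status_values : List String) : List (String × String) :=
  (template_values.foldl
    (fun (results : PySem.Dict String String) template =>
      let suggestions := (PySem.Dict.mk suggestions_mapping).getD template []
      let mtch := status_values.find? (fun status => suggestions.contains status)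
      match mtch with
      | some s => if s = "" then results.insert template "No match found" else results.insert template s
      | none => results.insert template "No match found")
    PySem.Dict.empty).items

-- ===== PORT B =====
-- B's rank table: status -> index of first occurrence (Python's setdefault loop)
def pvRankOf (status_values : List String) : PySem.Dict String Int :=
  (PySem.List.enumerate status_values).foldl (fun d p => d.setdefault p.2 p.1) PySem.Dict.empty

-- body of B's inner for-loop: keep the (rank, status) pair of strictly smallest rank
def pvBestStep (rank : PySem.Dict String Int) (best : Option (Int × String)) (s : String) : Option (Int × String) :=
  match rank.get? s with
  | none => best
  | some r =>
    match best with
    | none => some (r, s)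
    | some b => if r < b.1 then some (r, s) else best

-- B's inner for-loop over the suggestions
def pvBest (rank : PySem.Dict String Int) (sugg : List String) : Option (Int × String) :=
  sugg.foldl (pvBestStep rank) none

def map_template_to_status_alt (template_values : List String) (suggestions_mapping : List (String × List String)) (status_values : List String) : List (String × String) :=
  let rank := pvRankOf status_values
  (template_values.foldl
    (fun (results : PySem.Dict String String) template =>
      let best := pvBest rank ((PySem.Dict.mk suggestions_mapping).getD template [])
      let mtch := best.map (·.2)
      match mtch with
      | some s => if s = "" then results.insert template "No match found" else results.insert template s
      | none => results.insert template "No match found")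
    PySem.Dict.empty).items

-- ===== PRECONDITION & SPEC =====
def Spec_map_template_to_status (template_values : List String) (suggestions_mapping : List (String × List String)) (status_values : List String) (out : List (String × String)) : Prop := out = map_template_to_status_alt template_values suggestions_mapping status_values
instance (template_values : List String) (suggestions_mapping : List (String × List String)) (status_values : List String) (out : List (String × String)) : Decidable (Spec_map_template_to_status template_values suggestions_mapping status_values out) := by unfold Spec_map_template_to_status; infer_instance

-- ===== CLAIM (what is proved, stated in full; the proofs are below) =====
def Claim_equal_map_template_to_status : Prop := ∀ (template_values : List String) (suggestions_mapping : List (String × List String)) (status_values : List String), Dom_map_template_to_status template_values suggestions_mapping status_values → Spec_map_template_to_status template_values suggestions_mapping status_values (map_template_to_status template_values suggestions_mapping status_values)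

-- ===== LEMMAS AND PROOFS =====

-- the setdefault loop records the index of the FIRST occurrence of each status
theorem pvRank_get (sv : List String) (k : Int) (d : PySem.Dict String Int) (s : String) :
    ((PySem.List.enumerate sv k).foldl (fun d p => d.setdefault p.2 p.1) d).get? s
      = ((d.get? s).or ((PySem.List.index? sv s).map (fun n => k + n))) := by
  induction sv generalizing k d with
  | nil => simp [PySem.List.enumerate_nil, PySem.List.index?]
  | cons x xs ih =>
    rw [PySem.List.enumerate_cons]
    simp only [List.foldl_cons]
    rw [ih]
    by_cases hx : s = x
    · subst hx
      rw [PySem.List.index?_cons_self]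
      rw [PySem.Dict.get?_setdefault_self]
      cases h : d.get? s <;> simp [h]
    · rw [PySem.List.index?_cons_of_ne xs (Ne.symm hx)]
      rw [PySem.Dict.get?_setdefault_of_ne d k hx]
      cases h : d.get? s <;> cases hi : PySem.List.index? xs s <;>
        simp [h, hi] <;> push_cast <;> ring

theorem pvRankOf_get (sv : List String) (s : String) :
    (pvRankOf sv).get? s = (PySem.List.index? sv s).map (Nat.cast : Nat → Int) := by
  rw [pvRankOf, pvRank_get, PySem.Dict.get?_empty]
  cases h : PySem.List.index? sv s <;> simp [h]

theorem pvBest_of_get_none (rank : PySem.Dict String Int) (h : ∀ s, rank.get? s = none)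
    (sugg : List String) (acc : Option (Int × String)) : sugg.foldl (pvBestStep rank) acc = acc := by
  induction sugg generalizing acc with
  | nil => rfl
  | cons s rest ih =>
    rw [List.foldl_cons]
    have : pvBestStep rank acc s = acc := by rw [pvBestStep, h s]
    rw [this]
    exact ih acc

theorem pvBest_keep_zero (rank : PySem.Dict String Int)
    (hnn : ∀ s r, rank.get? s = some r → 0 ≤ r)
    (sugg : List String) (x : String) :
    sugg.foldl (pvBestStep rank) (some (0, x)) = some (0, x) := by
  induction sugg with
  | nil => rfl
  | cons s rest ih =>
    rw [List.foldl_cons]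
    have hstep : pvBestStep rank (some (0, x)) s = some (0, x) := by
      rw [pvBestStep]
      cases hg : rank.get? s with
      | none => rfl
      | some r =>
        have hr : ¬ r < 0 := not_lt.mpr (hnn s r hg)
        simp [hr]
    rw [hstep]
    exact ih

theorem pvBest_hit (rank : PySem.Dict String Int) (v : String)
    (h0 : rank.get? v = some 0) (hnn : ∀ s r, rank.get? s = some r → 0 ≤ r)
    (huniq : ∀ s, rank.get? s = some 0 → s = v)
    (sugg : List String) (acc : Option (Int × String))
    (hmem : v ∈ sugg)
    (hacc : acc = none ∨ ∃ r s', acc = some (r, s') ∧ rank.get? s' = some r) :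
    sugg.foldl (pvBestStep rank) acc = some (0, v) := by
  induction sugg generalizing acc with
  | nil => cases hmem
  | cons s rest ih =>
    rw [List.foldl_cons]
    by_cases hsv : s = v
    · subst hsv
      have hstep : pvBestStep rank acc s = some (0, s) := by
        rw [pvBestStep, h0]
        rcases hacc with h | ⟨r, s', h, hg⟩
        · rw [h]
        · subst h
          by_cases hr : (0:Int) < r
          · simp [hr]
          · have hr0 : r = 0 := le_antisymm (not_lt.mp hr) (hnn s' r hg)
            subst hr0
            have hs' : s' = s := huniq s' hg
            subst hs'
            simp
      rw [hstep]
      exact pvBest_keep_zero rank hnn rest s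
    · have hmem' : v ∈ rest := by
        cases hmem with
        | head => exact absurd rfl hsv
        | tail _ h => exact h
      apply ih _ hmem'
      rw [pvBestStep]
      cases hg : rank.get? s with
      | none => simpa using hacc
      | some r =>
        rcases hacc with h | ⟨r', s', h, hg'⟩
        · subst h
          exact Or.inr ⟨r, s, rfl, hg⟩
        · subst h
          by_cases hlt : r < r'
          · simp only [hlt, if_true]
            exact Or.inr ⟨r, s, rfl, hg⟩
          · simp only [hlt, if_false]
            exact Or.inr ⟨r', s', rfl, hg'⟩

theorem pvBest_shift (rank rank' : PySem.Dict String Int) (sugg : List String)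
    (hsh : ∀ s ∈ sugg, rank'.get? s = (rank.get? s).map (· + 1)) (acc : Option (Int × String)) :
    sugg.foldl (pvBestStep rank') (acc.map (fun b => (b.1 + 1, b.2)))
      = (sugg.foldl (pvBestStep rank) acc).map (fun b => (b.1 + 1, b.2)) := by
  induction sugg generalizing acc with
  | nil => rfl
  | cons s rest ih =>
    rw [List.foldl_cons, List.foldl_cons]
    have hg' := hsh s (by simp)
    have hrest : ∀ t ∈ rest, rank'.get? t = (rank.get? t).map (· + 1) :=
      fun t ht => hsh t (by simp [ht])
    have hstep : pvBestStep rank' (acc.map (fun b => (b.1 + 1, b.2))) s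
        = (pvBestStep rank acc s).map (fun b => (b.1 + 1, b.2)) := by
      rw [pvBestStep, pvBestStep, hg']
      cases hg : rank.get? s with
      | none => simp
      | some r =>
        simp only [Option.map_some]
        cases acc with
        | none => simp
        | some b =>
          simp only [Option.map_some]
          by_cases hlt : r < b.1
          · have h2 : r + 1 < b.1 + 1 := by omega
            simp [hlt, h2]
          · have h2 : ¬ (r + 1 < b.1 + 1) := by omega
            simp [hlt, h2]
    rw [hstep]
    exact ih hrest _

-- the per-template value: B's smallest-rank suggestion IS A's first matching status
theorem pvMain (sv sugg : List String) :
    (pvBest (pvRankOf sv) sugg).map (·.2) = sv.find? (fun status => sugg.contains status) := by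
  induction sv with
  | nil =>
    rw [pvBest, pvBest_of_get_none _ (fun s => by
      rw [pvRankOf_get]; simp [PySem.List.index?]) sugg none]
    simp
  | cons v tl ih =>
    by_cases hc : sugg.contains v = true
    · have hmem : v ∈ sugg := by simpa using hc
      rw [pvBest, pvBest_hit _ v ?h0 ?hnn ?huniq sugg none hmem (Or.inl rfl)]
      · simp [hmem]
      case h0 => rw [pvRankOf_get, PySem.List.index?_cons_self]; rfl
      case hnn =>
        intro s r h
        rw [pvRankOf_get] at h
        obtain ⟨n, -, hn⟩ := Option.map_eq_some_iff.mp h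
        omega
      case huniq =>
        intro s h
        by_contra hne
        rw [pvRankOf_get, PySem.List.index?_cons_of_ne tl (show v ≠ s from fun he => hne he.symm)] at h
        obtain ⟨m, hm, hc2⟩ := Option.map_eq_some_iff.mp h
        obtain ⟨n, -, hn⟩ := Option.map_eq_some_iff.mp hm
        omega
    · have hnm : v ∉ sugg := by simpa using hc
      have hsh : ∀ s ∈ sugg, (pvRankOf (v :: tl)).get? s = ((pvRankOf tl).get? s).map (· + 1) := by
        intro s hs
        have hne : v ≠ s := fun he => hnm (he ▸ hs)
        rw [pvRankOf_get, pvRankOf_get, PySem.List.index?_cons_of_ne tl hne]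
        cases h : PySem.List.index? tl s <;> simp [h]
      have hshift := pvBest_shift (pvRankOf tl) (pvRankOf (v :: tl)) sugg hsh none
      simp only [Option.map_none] at hshift
      rw [pvBest, hshift, Option.map_map]
      have hsnd : ((fun b => (b.2 : String)) ∘ (fun b => (b.1 + 1, b.2))) = (fun (b : Int × String) => b.2) := rfl
      rw [hsnd]
      rw [← pvBest] at *
      rw [ih]
      simp [List.find?_cons, hnm]

-- ===== VERDICT (by name: the statement is the Claim_ definition above) =====
theorem map_template_to_status_spec : Claim_equal_map_template_to_status := by
  intro template_values suggestions_mapping status_values _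
  unfold Spec_map_template_to_status
  simp only [map_template_to_status, map_template_to_status_alt]
  congr 1
  apply PySem.List.foldl_congr_mem
  intro results template hmem
  rw [← pvMain status_values ((PySem.Dict.mk suggestions_mapping).getD template [])]
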